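-- pv_equiv track=rewrite | github.com/agustinf264-star/programacion_fernandez_agustin | ejladygag.py | obtener_codigo
-- ===== SOURCE A (Python) =====
-- def obtener_codigo(url: str) -> str:
--     codigo = ""
--     separacion = False
--     for i in range(len(url)):
--         if url[i] == "=":
--             separacion = True #encontro el "="
--         elif separacion: #separacion es True pero ya lo paso
--             codigo += url[i]
--     return codigo
-- ===== SOURCE B (Python) =====
-- def obtener_codigo(url: str) -> str:
--     i = url.find("=")
--     if i < 0:
--         return ""
--     return url[i + 1:].replace("=", "")
-- ===== Notes on version B (the rewrite author's own statement) =====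
-- stated objective: faster
-- what changed: Replaces the char-by-char flag-state scan with library calls: find the first delimiter, slice the tail, and strip the remaining delimiters with replace (A silently drops every delimiter, so partition alone would not match).
import Mathlib
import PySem

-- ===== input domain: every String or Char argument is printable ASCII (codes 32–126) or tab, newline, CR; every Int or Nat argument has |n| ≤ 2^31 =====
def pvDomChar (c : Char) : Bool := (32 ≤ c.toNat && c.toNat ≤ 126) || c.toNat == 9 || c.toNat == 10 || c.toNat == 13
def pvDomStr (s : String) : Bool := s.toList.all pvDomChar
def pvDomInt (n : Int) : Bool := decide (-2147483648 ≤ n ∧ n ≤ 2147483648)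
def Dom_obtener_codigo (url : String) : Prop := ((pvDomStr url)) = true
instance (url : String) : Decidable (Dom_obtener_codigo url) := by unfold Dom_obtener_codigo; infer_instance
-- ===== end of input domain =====

-- B replaces A's char-by-char flag-state scan by find + slice + replace("=",""); same O(n), measurably faster via C-level string routines.


-- ===== PORT A =====
-- 'for i in range(len(url)): url[i]' walks the characters in order; codigo += url[i] is acc ++ [c].
-- A's loop body (the three branches in Python's order).
def pvStepA (st : List Char × Bool) (c : Char) : List Char × Bool :=
  if c == '=' then (st.1, true)
  else if st.2 then (st.1 ++ [c], st.2)
  else st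

def obtener_codigo (url : String) : String :=
  let r := url.toList.foldl pvStepA ([], false)
  String.ofList r.1

-- ===== PORT B =====
def obtener_codigo_alt (url : String) : String :=
  let i := PySem.Str.find url "="
  if i < 0 then ""
  else PySem.Str.replace (PySem.Str.slice url (some (i + 1)) none) "=" ""

-- ===== PRECONDITION & SPEC =====
def Spec_obtener_codigo (url : String) (out : String) : Prop := out = obtener_codigo_alt url
instance (url : String) (out : String) : Decidable (Spec_obtener_codigo url out) := by unfold Spec_obtener_codigo; infer_instance

-- ===== CLAIM (what is proved, stated in full; the proofs are below) =====
def Claim_equal_obtener_codigo : Prop := ∀ (url : String), Dom_obtener_codigo url → Spec_obtener_codigo url (obtener_codigo url)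

-- ===== LEMMAS AND PROOFS =====

lemma pvFoldA_no_eq (l : List Char) (h : '=' ∉ l) :
    l.foldl pvStepA ([], false) = ([], false) := by
  induction l with
  | nil => rfl
  | cons c t ih =>
    simp only [List.mem_cons, not_or] at h
    have hc : ¬ c = '=' := fun e => h.1 e.symm
    simp [pvStepA, List.foldl_cons, hc, ih h.2]

lemma pvFoldA_after (l : List Char) (acc : List Char) :
    l.foldl pvStepA (acc, true) = (acc ++ l.filter (fun c => !(c == '=')), true) := by
  induction l generalizing acc with
  | nil => simp
  | cons c t ih =>
    by_cases hc : c = '='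
    · subst hc; simp [pvStepA, List.foldl_cons, ih]
    · simp [pvStepA, List.foldl_cons, hc, ih]

lemma pvReplace_go_eq (fuel : Nat) (l acc : List Char) (h : l.length ≤ fuel) :
    PySem.Chars.replace.go ['='] [] fuel l acc
      = acc.reverse ++ l.filter (fun c => !(c == '=')) := by
  induction fuel generalizing l acc with
  | zero =>
    have hl : l = [] := List.length_eq_zero_iff.mp (Nat.le_zero.mp h)
    subst hl
    simp [PySem.Chars.replace.go]
  | succ n ih =>
    cases l with
    | nil => simp [PySem.Chars.replace.go]
    | cons c t =>
      by_cases hc : c = '='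
      · subst hc
        have hp : List.isPrefixOf ['='] ('=' :: t) = true := by simp [List.isPrefixOf]
        simp only [PySem.Chars.replace.go, hp, if_true]
        rw [ih]
        · simp
        · simpa using Nat.le_of_succ_le_succ h
      · have hp : List.isPrefixOf ['='] (c :: t) = false := by
          simp [List.isPrefixOf, (Ne.symm hc : ¬ '=' = c)]
        simp only [PySem.Chars.replace.go, hp, Bool.false_eq_true, if_false]
        rw [ih]
        · simp [hc]
        · simpa using Nat.le_of_succ_le_succ h

lemma pvReplace_eq_filter (l : List Char) :
    PySem.Chars.replace l ['='] [] = l.filter (fun c => !(c == '=')) := by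
  simp only [PySem.Chars.replace]
  rw [if_neg (by simp)]
  exact pvReplace_go_eq l.length l [] le_rfl

theorem obtener_codigo_spec : Claim_equal_obtener_codigo := by
  intro url _
  unfold Spec_obtener_codigo obtener_codigo obtener_codigo_alt
  set cs := url.toList with hcs
  by_cases h : ('=' ∈ cs)
  · -- '=' occurs: Python's find returns the first index j ≥ 0
    have hinf : ['='] <:+: cs := by
      obtain ⟨l₁, l₂, hsp⟩ := List.append_of_mem h
      exact ⟨l₁, l₂, by rw [hsp]; simp⟩
    have hne : PySem.Chars.findFrom cs ['='] 0 none ≠ -1 := by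
      rw [PySem.Chars.findFrom_zero]
      exact (PySem.Chars.find_ne_neg_one_iff cs ['=']).mpr hinf
    obtain ⟨-, hpre, hmin⟩ :=
      PySem.Chars.findFrom_natCast_spec cs ['='] 0 (Nat.zero_le _) hne
    simp only [Nat.cast_zero, PySem.Chars.findFrom_zero] at hpre hmin
    set j : Int := PySem.Chars.find cs ['='] with hj
    have hj0 : 0 ≤ j := by
      rw [hj, PySem.Chars.find_nonneg_iff]; exact hinf
    -- drop j.toNat starts with '='
    obtain ⟨t, ht⟩ := hpre
    have hdrop : cs.drop j.toNat = '=' :: t := by simpa using ht.symm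
    have hfindStr : PySem.Str.find url "=" = j := by
      simp [PySem.Str.find_eq, ← hcs, hj]
    rw [hfindStr, if_neg (by omega)]
    -- B side: slice is drop, replace is filter
    have hslice : (PySem.Str.slice url (some (j + 1)) none).toList
        = cs.drop (j + 1).toNat := by
      simp only [PySem.Str.toList_slice, PySem.Chars.slice_eq_listSlice, ← hcs]
      exact PySem.List.slice_from cs (by omega)
    -- A side: split cs at j
    have hjlen : j.toNat < cs.length := by
      have := List.drop_eq_nil_iff (l := cs) (i := j.toNat)
      by_cases hh : j.toNat < cs.length
      · exact hh
      · rw [hdrop] at this; simp at this; omega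
    have hsplit : cs = cs.take j.toNat ++ '=' :: cs.drop (j.toNat + 1) := by
      have h1 : List.drop 1 (List.drop j.toNat cs) = t := by rw [hdrop]; rfl
      rw [List.drop_drop] at h1
      conv_lhs => rw [← List.take_append_drop j.toNat cs]
      rw [hdrop, ← h1, Nat.add_comm]
    have hnotpre : '=' ∉ cs.take j.toNat := by
      intro hmem
      obtain ⟨i, hi, hig⟩ := List.getElem_of_mem hmem
      have hilen : i < j.toNat := by simp at hi; omega
      have hiclen : i < cs.length := by omega
      refine hmin i (by omega) (by omega) ⟨cs.drop (i + 1), ?_⟩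
      have hgi : cs[i] = '=' := by simpa using hig
      rw [← List.getElem_cons_drop hiclen, hgi]
      rfl
    -- run A's fold over the split
    have hA : cs.foldl pvStepA ([], false)
        = ((cs.drop (j.toNat + 1)).filter (fun c => !(c == '=')), true) := by
      conv_lhs => rw [hsplit]
      rw [List.foldl_append, pvFoldA_no_eq _ hnotpre]
      simp only [List.foldl_cons]
      have : pvStepA ([], false) '=' = ([], true) := by simp [pvStepA]
      rw [this, pvFoldA_after]
      simp
    -- finish: strings equal via toList
    apply String.toList_injective
    simp only [PySem.Str.toList_replace, hslice]
    rw [show ("=".toList) = ['='] from rfl, show ("".toList) = ([] : List Char) from rfl,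
      pvReplace_eq_filter]
    show (String.ofList (cs.foldl pvStepA ([], false)).1).toList = _
    have hnn : (j + 1).toNat = j.toNat + 1 := by omega
    rw [String.toList_ofList, hA, hnn]
  · -- no '=' anywhere: A's flag never fires, B's find is -1
    have hni : ¬ ['='] <:+: cs := by
      intro hinf
      exact h (hinf.subset (by simp))
    have hfindStr : PySem.Str.find url "=" = -1 := by
      have := (PySem.Chars.find_eq_neg_one_iff cs ['=']).mpr hni
      simp [PySem.Str.find_eq, ← hcs]
      simpa using this
    rw [hfindStr, if_pos (by omega)]
    show String.ofList (cs.foldl pvStepA ([], false)).1 = ""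
    rw [pvFoldA_no_eq cs h]
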